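-- pv_equiv track=rewrite | github.com/Peprfish/pick-your-python | mvp_01/CODE/player_main.py | base_formatter
-- ===== SOURCE A (Python) =====
-- def base_formatter(textfile_contents):
--
--     # helps to rearrange textfile_contents (corresponding to udir.get_textfile_contents(*FILE*))
--     # into a more useful format based on the "-" and "=" delimiter elements
--
--     # the output is a 2D list, basically:
--     # the elements in the higher-level list are split based on the "=" delimiter,
--     # while the elements in the lower-level list are split based on the "-" delimiter
--     # consecutive elements in textfile_contents not split by the "-" delimiter are joined together
--     # into a conglomerate string in the output list using "\n"s
--
--     output_list = []
--
--     temp_str = ""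
--     temp_list = []
--     for element in textfile_contents:
--         if element == "=":
--             temp_list.append(temp_str)
--             temp_str = ""
--             output_list.append(temp_list)
--             temp_list = []
--         elif element == "-":
--             temp_list.append(temp_str)
--             temp_str = ""
--         else:
--             if temp_str == "":
--                 # to prevent temp_str from starting with a "\n"
--                 temp_str = element
--             else:
--                 temp_str += "\n" + element
--     temp_list.append(temp_str)
--     output_list.append(temp_list)
--
--     return output_list
-- ===== SOURCE B (Python) =====
-- def _split(xs, sep):
--     # split xs on sep, keeping empty groups and the trailing group
--     out = []
--     cur = []
--     for x in xs:
--         if x == sep: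
--             out.append(cur)
--             cur = []
--         else:
--             cur.append(x)
--     out.append(cur)
--     return out
--
-- def _join(seg):
--     # drop leading empty elements, then newline-join the rest
--     while seg and seg[0] == "":
--         seg = seg[1:]
--     return "\n".join(seg)
--
-- def base_formatter(textfile_contents):
--     return [[_join(seg) for seg in _split(group, "-")]
--             for group in _split(textfile_contents, "=")]
-- ===== Notes on version B (the rewrite author's own statement) =====
-- stated objective: simpler
-- what changed: Replaced A's single stateful loop over (output_list, temp_list, temp_str) by a three-stage decomposition: split the list on '=', split each group on '-', and map each segment to a string by dropping its leading empty elements and '\n'-joining the rest.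
import Mathlib
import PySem

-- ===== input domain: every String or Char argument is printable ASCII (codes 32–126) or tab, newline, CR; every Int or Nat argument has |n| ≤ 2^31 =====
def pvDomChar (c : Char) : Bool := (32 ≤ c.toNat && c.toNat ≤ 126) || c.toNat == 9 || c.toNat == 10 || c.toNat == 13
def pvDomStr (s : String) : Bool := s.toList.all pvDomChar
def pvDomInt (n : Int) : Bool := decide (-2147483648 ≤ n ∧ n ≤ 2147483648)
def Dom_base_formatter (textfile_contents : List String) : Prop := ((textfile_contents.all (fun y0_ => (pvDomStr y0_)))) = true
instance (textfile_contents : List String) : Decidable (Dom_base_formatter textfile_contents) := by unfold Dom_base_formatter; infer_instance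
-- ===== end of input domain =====

-- B re-decomposes A's single stateful loop as: split on "=", split each group on "-",
-- then join each segment (dropping its leading empty elements) — objective: simpler.

-- ===== PORT A =====
-- literal transliteration of A's accumulator loop over (output_list, temp_list, temp_str)
def base_formatter (textfile_contents : List String) : List (List String) :=
  let st := textfile_contents.foldl
    (fun (acc : List (List String) × List String × String) element =>
      let output_list := acc.1
      let temp_list := acc.2.1
      let temp_str := acc.2.2
      if element = "=" then
        (output_list ++ [temp_list ++ [temp_str]], [], "")
      else if element = "-" then
        (output_list, temp_list ++ [temp_str], "")
      else if temp_str = "" then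
        (output_list, temp_list, element)
      else
        (output_list, temp_list, temp_str ++ "\n" ++ element))
    ([], [], "")
  st.1 ++ [st.2.1 ++ [st.2.2]]

-- ===== PORT B =====
-- Source B's _split: one loop over xs with accumulators (out, cur), appending cur on each sep
def pvSplit (sep : String) (xs : List String) : List (List String) :=
  let st := xs.foldl
    (fun (acc : List (List String) × List String) x =>
      if x = sep then (acc.1 ++ [acc.2], []) else (acc.1, acc.2 ++ [x]))
    ([], [])
  st.1 ++ [st.2]

-- Source B's _join: drop leading empty elements, then "\n".join the rest
def pvJoin : List String → String
  | [] => PySem.Str.join "\n" ([] : List String)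
  | x :: xs => if x = "" then pvJoin xs else PySem.Str.join "\n" (x :: xs)

def base_formatter_alt (textfile_contents : List String) : List (List String) :=
  (pvSplit "=" textfile_contents).map (fun group => (pvSplit "-" group).map pvJoin)

-- ===== PRECONDITION & SPEC =====
def Spec_base_formatter (textfile_contents : List String) (out : List (List String)) : Prop := out = base_formatter_alt textfile_contents
instance (textfile_contents : List String) (out : List (List String)) : Decidable (Spec_base_formatter textfile_contents out) := by unfold Spec_base_formatter; infer_instance

-- ===== CLAIM (what is proved, stated in full; the proofs are below) =====
def Claim_equal_base_formatter : Prop := ∀ (textfile_contents : List String), Dom_base_formatter textfile_contents → Spec_base_formatter textfile_contents (base_formatter textfile_contents)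

-- ===== LEMMAS AND PROOFS =====

-- recursive characterization of pvSplit, used by the proofs
def recSplit (sep : String) : List String → List (List String)
  | [] => [[]]
  | x :: xs =>
    let tail := recSplit sep xs
    if x = sep then [] :: tail
    else (x :: tail.headD []) :: tail.tail

theorem recSplit_ne_nil (sep : String) (xs : List String) : recSplit sep xs ≠ [] := by
  cases xs with
  | nil => simp [recSplit]
  | cons x xs => simp only [recSplit]; split <;> simp

theorem splitLoop_inv (sep : String) (xs : List String) :
    ∀ (out : List (List String)) (cur : List String),
    (let st := xs.foldl
        (fun (acc : List (List String) × List String) x =>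
          if x = sep then (acc.1 ++ [acc.2], []) else (acc.1, acc.2 ++ [x]))
        (out, cur);
      st.1 ++ [st.2]) =
      out ++ match recSplit sep xs with
        | [] => []
        | h :: t => (cur ++ h) :: t := by
  induction xs with
  | nil => intro out cur; simp [recSplit]
  | cons x xs ih =>
    intro out cur
    rcases h : recSplit sep xs with _ | ⟨g, gs⟩
    · exact absurd h (recSplit_ne_nil _ _)
    · by_cases hx : x = sep
      · subst hx
        simp only [List.foldl_cons, if_true]
        rw [ih (out ++ [cur]) []]
        simp [recSplit, h]
      · simp only [List.foldl_cons, if_neg hx]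
        rw [ih out (cur ++ [x])]
        simp [recSplit, h, if_neg hx]

theorem pvSplit_eq_recSplit (sep : String) (xs : List String) :
    pvSplit sep xs = recSplit sep xs := by
  unfold pvSplit
  rw [splitLoop_inv sep xs [] []]
  rcases h : recSplit sep xs with _ | ⟨g, gs⟩
  · exact absurd h (recSplit_ne_nil _ _)
  · simp

-- A's temp_str update rule
def stepStr (s e : String) : String := if s = "" then e else s ++ "\n" ++ e

-- A's temp_str accumulation over the elements of one segment
def joinFrom (s : String) : List String → String
  | [] => s
  | e :: rest => joinFrom (stepStr s e) rest

-- what A contributes for one "="-group, with pending temp_str s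
def mapSegs (s : String) (g : List String) : List String :=
  match recSplit "-" g with
  | [] => []
  | seg :: rest => joinFrom s seg :: rest.map pvJoin

theorem joinStr_cons_cons (a b : String) (l : List String) :
    PySem.Str.join "\n" (a :: b :: l) = a ++ "\n" ++ PySem.Str.join "\n" (b :: l) := by
  simp only [PySem.Str.join, List.map_cons, PySem.Chars.join_cons_cons]
  apply String.toList_injective
  simp

theorem str_append_nl_ne (s e : String) : s ++ "\n" ++ e ≠ "" := by
  intro h
  have := congrArg String.toList h
  simp at this

theorem joinStr_shift (rest : List String) (s e : String) :
    PySem.Str.join "\n" ((s ++ "\n" ++ e) :: rest) = s ++ "\n" ++ PySem.Str.join "\n" (e :: rest) := by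
  cases rest with
  | nil =>
    simp only [PySem.Str.join, List.map_cons, List.map_nil, PySem.Chars.join_singleton]
    apply String.toList_injective
    simp
  | cons r rs =>
    rw [joinStr_cons_cons, joinStr_cons_cons]
    simp [String.append_assoc]

theorem joinFrom_of_ne (seg : List String) : ∀ (s : String), s ≠ "" →
    joinFrom s seg = PySem.Str.join "\n" (s :: seg) := by
  induction seg with
  | nil => intro s _; simp [joinFrom, PySem.Str.join, PySem.Chars.join_singleton]
  | cons e rest ih =>
    intro s hs
    rw [joinStr_cons_cons]
    simp only [joinFrom, stepStr, if_neg hs]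
    rw [ih _ (str_append_nl_ne s e), joinStr_shift]

theorem joinFrom_nil_eq (seg : List String) : joinFrom "" seg = pvJoin seg := by
  induction seg with
  | nil => simp [joinFrom, pvJoin, PySem.Str.join, PySem.Chars.join_nil]
  | cons e rest ih =>
    by_cases he : e = ""
    · subst he; simp only [joinFrom, stepStr, pvJoin]; exact ih
    · simp only [joinFrom, stepStr, pvJoin, if_neg he]
      exact joinFrom_of_ne rest e he

theorem mapSegs_nil (s : String) : mapSegs s [] = [s] := by
  simp [mapSegs, recSplit, joinFrom]

theorem mapSegs_zero (g : List String) : mapSegs "" g = (recSplit "-" g).map pvJoin := by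
  unfold mapSegs
  rcases h : recSplit "-" g with _ | ⟨seg, rest⟩
  · exact absurd h (recSplit_ne_nil _ _)
  · simp [joinFrom_nil_eq]

theorem mapSegs_dash (s : String) (g : List String) :
    mapSegs s ("-" :: g) = s :: (recSplit "-" g).map pvJoin := by
  unfold mapSegs
  rcases h : recSplit "-" g with _ | ⟨seg, rest⟩
  · exact absurd h (recSplit_ne_nil _ _)
  · simp [recSplit, h, joinFrom]

theorem mapSegs_elem (s e : String) (g : List String) (he : e ≠ "-") :
    mapSegs s (e :: g) = mapSegs (stepStr s e) g := by
  unfold mapSegs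
  rcases h : recSplit "-" g with _ | ⟨seg, rest⟩
  · exact absurd h (recSplit_ne_nil _ _)
  · simp [recSplit, h, if_neg he, joinFrom]

-- the body of A's fold, named for the invariant proof
def stepA (acc : List (List String) × List String × String) (element : String) :
    List (List String) × List String × String :=
  if element = "=" then
    (acc.1 ++ [acc.2.1 ++ [acc.2.2]], [], "")
  else if element = "-" then
    (acc.1, acc.2.1 ++ [acc.2.2], "")
  else if acc.2.2 = "" then
    (acc.1, acc.2.1, element)
  else
    (acc.1, acc.2.1, acc.2.2 ++ "\n" ++ element)

-- loop invariant: the finished groups 'out', the pending group 'lst' and pending string 's'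
-- combine with B's decomposition of the remaining input
theorem loop_inv (xs : List String) :
    ∀ (out : List (List String)) (lst : List String) (s : String),
    (let st := xs.foldl stepA (out, lst, s); st.1 ++ [st.2.1 ++ [st.2.2]]) =
      out ++ (match recSplit "=" xs with
        | [] => []
        | g :: gs => (lst ++ mapSegs s g) :: gs.map (fun g => (recSplit "-" g).map pvJoin)) := by
  induction xs with
  | nil => intro out lst s; simp [recSplit, mapSegs_nil]
  | cons x xs ih =>
    intro out lst s
    by_cases hx : x = "="
    · subst hx
      rcases h : recSplit "=" xs with _ | ⟨g, gs⟩
      · exact absurd h (recSplit_ne_nil _ _)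
      · simp only [List.foldl_cons, stepA, if_true]
        rw [ih (out ++ [lst ++ [s]]) [] ""]
        simp [recSplit, h, mapSegs_nil, mapSegs_zero]
    · by_cases hd : x = "-"
      · subst hd
        rcases h : recSplit "=" xs with _ | ⟨g, gs⟩
        · exact absurd h (recSplit_ne_nil _ _)
        · simp only [List.foldl_cons, stepA, if_neg (by decide : ("-" : String) ≠ "="), if_true]
          rw [ih out (lst ++ [s]) ""]
          simp [recSplit, h, mapSegs_dash, mapSegs_zero]
      · rcases h : recSplit "=" xs with _ | ⟨g, gs⟩
        · exact absurd h (recSplit_ne_nil _ _)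
        · have hstep : xs.foldl stepA (stepA (out, lst, s) x) = xs.foldl stepA (out, lst, stepStr s x) := by
            simp only [stepA, stepStr, if_neg hx, if_neg hd]
            split <;> rfl
          simp only [List.foldl_cons, hstep]
          rw [ih out lst (stepStr s x)]
          simp [recSplit, h, if_neg hx, mapSegs_elem s x g hd]

theorem base_formatter_eq_steps (xs : List String) :
    base_formatter xs =
      (let st := xs.foldl stepA ([], [], ""); st.1 ++ [st.2.1 ++ [st.2.2]]) := by
  unfold base_formatter
  congr 1

-- ===== VERDICT (by name: the statement is the Claim_ definition above) =====
theorem base_formatter_spec : Claim_equal_base_formatter := by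
  intro xs _
  unfold Spec_base_formatter
  rw [base_formatter_eq_steps, loop_inv xs [] [] ""]
  unfold base_formatter_alt
  simp only [pvSplit_eq_recSplit]
  rcases h : recSplit "=" xs with _ | ⟨g, gs⟩
  · exact absurd h (recSplit_ne_nil _ _)
  · simp [mapSegs_zero]
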